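-- pv_equiv track=rewrite | github.com/JinfuC/Solving-AoC-2023 | day7/day7.py | card_sorting
-- ===== SOURCE A (Python) =====
-- def card_sorting(card1, card2):
--
--     mapping = {'A': 1 ,'K': 2 ,'Q':3 ,'J':4 ,'T':5}
--
--     for i in range(0,len(card1[0])):
--         if card1[0][i] == card2[0][i]:
--             continue
--         # both number cards
--         elif (card1[0][i] in '23456789' and card2[0][i] in '23456789'):
--             if card1[0][i] < card2[0][i]:
--                 return 1
--             else:
--                 return -1
--         # both character cards
--         elif (card1[0][i] in 'AKQJT' and card2[0][i] in 'AKQJT'):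
--             if mapping[card1[0][i]] < mapping[card2[0][i]]:
--                 return -1
--             else:
--                 return 1
--         # one is character other one is number
--         else:
--             if card1[0][i] in 'AKQJT':
--                 return -1
--             else:
--                 return 1
-- ===== SOURCE B (Python) =====
-- # A's three class-wise branches implement one total order AKQJT98765432;
-- # B precomputes that order as a rank table, collects the differing card pairs
-- # in one pass, and decides from the first one with a single rank comparison.
-- RANK = {c: i for i, c in enumerate('AKQJT98765432')}
--
-- def card_sorting(card1, card2):
--     diffs = [(a, b) for a, b in zip(card1[0], card2[0]) if a != b]
--     if not diffs:
--         return None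
--     a, b = diffs[0]
--     if a in RANK and b in RANK:
--         return -1 if RANK[a] < RANK[b] else 1
--     return -1 if a in 'AKQJT' else 1
-- ===== Notes on version B (the rewrite author's own statement) =====
-- stated objective: alternative
-- what changed: B replaces A's early-return scan with its four-way class branch chain (digit/digit, face/face, mixed) by two stages: a precomputed rank table over the single total order 'AKQJT98765432' that A's branches jointly implement, plus one pass collecting all differing card pairs, deciding from the first pair with a single rank comparison (unknown characters fall back to the face test).
import Mathlib
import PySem

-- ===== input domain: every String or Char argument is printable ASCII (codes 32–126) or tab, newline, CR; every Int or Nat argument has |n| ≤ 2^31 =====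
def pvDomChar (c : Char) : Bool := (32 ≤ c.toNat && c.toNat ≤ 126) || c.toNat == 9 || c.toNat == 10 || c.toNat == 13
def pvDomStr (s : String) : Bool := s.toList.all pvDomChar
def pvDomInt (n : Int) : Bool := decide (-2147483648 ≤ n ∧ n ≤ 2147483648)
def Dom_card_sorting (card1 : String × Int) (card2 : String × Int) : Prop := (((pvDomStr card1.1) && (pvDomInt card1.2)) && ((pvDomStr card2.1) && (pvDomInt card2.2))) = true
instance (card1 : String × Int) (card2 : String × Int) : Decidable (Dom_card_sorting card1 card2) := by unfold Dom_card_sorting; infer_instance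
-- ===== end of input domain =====

-- B replaces A's scan with its class-wise branch chain by a precomputed rank table
-- over the total order 'AKQJT98765432' plus a pass collecting the differing pairs
-- and one rank comparison on the first (alternative decomposition, same cost).

-- the card strings 'AKQJT' and '23456789'; 'c in s' on a single character c is
-- membership of c among s's characters
def csFACE : List Char := ['A', 'K', 'Q', 'J', 'T']
def csDIGITS : List Char := ['2', '3', '4', '5', '6', '7', '8', '9']

-- ===== PORT A =====
-- mapping = {'A': 1 ,'K': 2 ,'Q':3 ,'J':4 ,'T':5}
def csMapping : PySem.Dict Char Int :=
  PySem.Dict.ofList [('A', 1), ('K', 2), ('Q', 3), ('J', 4), ('T', 5)]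

-- the for-loop over i in range(0, len(card1[0])): both strings are walked in step;
-- Python's IndexError on card2[0][i] (card2 shorter with an equal prefix) is outside
-- Pre_, the port returns none there. mapping[...] is only reached with the key
-- present, so getD _ 0 is exact there.
def csLoopA : List Char → List Char → Option Int
  | [], _ => none                    -- loop ends without return → Python returns None
  | _ :: _, [] => none               -- IndexError in Python; excluded by Pre_
  | c1 :: r1, c2 :: r2 =>
    if c1 == c2 then csLoopA r1 r2
    else if (csDIGITS.contains c1 && csDIGITS.contains c2) then
      if c1 < c2 then some 1 else some (-1)
    else if (csFACE.contains c1 && csFACE.contains c2) then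
      if csMapping.getD c1 0 < csMapping.getD c2 0 then some (-1) else some 1
    else
      if csFACE.contains c1 then some (-1) else some 1

def card_sorting (card1 : String × Int) (card2 : String × Int) : Option Int :=
  csLoopA card1.1.toList card2.1.toList

-- ===== PORT B =====
-- RANK = {c: i for i, c in enumerate('AKQJT98765432')}
def csRANK : PySem.Dict Char Int :=
  PySem.Dict.ofList ((PySem.List.enumerate "AKQJT98765432".toList).map (fun p => (p.2, p.1)))

-- RANK[a] / RANK[b] are only read in Python after 'a in RANK and b in RANK', so
-- getD _ 0 is exact there
def card_sorting_alt (card1 : String × Int) (card2 : String × Int) : Option Int :=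
  match (card1.1.toList.zip card2.1.toList).filter (fun p => p.1 != p.2) with
  | [] => none
  | (a, b) :: _ =>
    if csRANK.contains a && csRANK.contains b then
      if csRANK.getD a 0 < csRANK.getD b 0 then some (-1) else some 1
    else
      if csFACE.contains a then some (-1) else some 1

-- ===== PRECONDITION & SPEC =====
-- Pre_ excludes exactly the inputs on which A raises IndexError: card2's hand a
-- strict prefix of card1's (shorter, and equal as far as it goes), where A's loop
-- reaches an index past card2's end.
def Pre_card_sorting (card1 : String × Int) (card2 : String × Int) : Prop :=
  ¬ (card2.1.toList.length < card1.1.toList.length ∧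
     card1.1.toList.take card2.1.toList.length = card2.1.toList)
instance (card1 : String × Int) (card2 : String × Int) : Decidable (Pre_card_sorting card1 card2) := by unfold Pre_card_sorting; infer_instance

def pvWitness_card_sorting : (String × Int) × (String × Int) := (("32T", 765), ("T55", 684))

def Spec_card_sorting (card1 : String × Int) (card2 : String × Int) (out : Option Int) : Prop := out = card_sorting_alt card1 card2
instance (card1 : String × Int) (card2 : String × Int) (out : Option Int) : Decidable (Spec_card_sorting card1 card2 out) := by unfold Spec_card_sorting; infer_instance

-- ===== CLAIM (what is proved, stated in full; the proofs are below) =====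
def Claim_equal_card_sorting : Prop := ∀ (card1 : String × Int) (card2 : String × Int), Dom_card_sorting card1 card2 → Pre_card_sorting card1 card2 → Spec_card_sorting card1 card2 (card_sorting card1 card2)


-- ===== LEMMAS AND PROOFS =====

-- the 13 valid card characters (proof-side helper)
def csVALID : List Char := csFACE ++ csDIGITS

-- csRANK as a literal dict
theorem csRANK_eq : csRANK = PySem.Dict.mk [('A',0),('K',1),('Q',2),('J',3),('T',4),('9',5),('8',6),('7',7),('6',8),('5',9),('4',10),('3',11),('2',12)] := by decide

theorem csRANK_not_contains (c : Char) (h : c ∉ csVALID) : csRANK.contains c = false := by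
  rw [csRANK_eq]
  simp only [csVALID, csFACE, csDIGITS, List.mem_append, List.mem_cons, not_or,
    List.not_mem_nil, and_true, not_false_iff] at h
  obtain ⟨⟨f1, f2, f3, f4, f5⟩, d2, d3, d4, d5, d6, d7, d8, d9⟩ := h
  simp [PySem.Dict.contains_mk, Ne.symm f1, Ne.symm f2, Ne.symm f3, Ne.symm f4, Ne.symm f5,
    Ne.symm d2, Ne.symm d3, Ne.symm d4, Ne.symm d5, Ne.symm d6, Ne.symm d7, Ne.symm d8, Ne.symm d9]

-- on any two distinct characters, A's branch chain returns B's rank decision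
theorem csStep_eq (c1 c2 : Char) (hne : c1 ≠ c2) :
    ((if (csDIGITS.contains c1 && csDIGITS.contains c2) then
        if c1 < c2 then some (1 : Int) else some (-1)
      else if (csFACE.contains c1 && csFACE.contains c2) then
        if csMapping.getD c1 0 < csMapping.getD c2 0 then some (-1) else some 1
      else
        if csFACE.contains c1 then some (-1) else some 1) : Option Int)
    = (if csRANK.contains c1 && csRANK.contains c2 then
         if csRANK.getD c1 0 < csRANK.getD c2 0 then some (-1) else some 1
       else
         if csFACE.contains c1 then some (-1) else some 1) := by
  by_cases hv1 : c1 ∈ csVALID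
  · by_cases hv2 : c2 ∈ csVALID
    · fin_cases hv1 <;> fin_cases hv2 <;> first | (exact absurd rfl hne) | decide
    · have hf : c2 ∉ csFACE := fun h => hv2 (List.mem_append_left _ h)
      have hd : c2 ∉ csDIGITS := fun h => hv2 (List.mem_append_right _ h)
      simp [csRANK_not_contains c2 hv2, hf, hd]
  · have hf : c1 ∉ csFACE := fun h => hv1 (List.mem_append_left _ h)
    have hd : c1 ∉ csDIGITS := fun h => hv1 (List.mem_append_right _ h)
    simp [csRANK_not_contains c1 hv1, hf, hd]

theorem csLoop_eq (l1 l2 : List Char)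
    (hpre : ¬ (l2.length < l1.length ∧ l1.take l2.length = l2)) :
    csLoopA l1 l2 =
      (match (l1.zip l2).filter (fun p => p.1 != p.2) with
       | [] => none
       | (a, b) :: _ =>
         if csRANK.contains a && csRANK.contains b then
           if csRANK.getD a 0 < csRANK.getD b 0 then some (-1) else some 1
         else
           if csFACE.contains a then some (-1) else some 1) := by
  induction l1 generalizing l2 with
  | nil => cases l2 <;> simp [csLoopA]
  | cons c1 r1 ih =>
    cases l2 with
    | nil => exact absurd ⟨by simp, by simp⟩ hpre
    | cons c2 r2 =>
      by_cases heq : c1 == c2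
      · have hc : c1 = c2 := eq_of_beq heq
        subst hc
        have hpre' : ¬ (r2.length < r1.length ∧ r1.take r2.length = r2) := by
          intro ⟨h1, h2⟩
          exact hpre ⟨by simpa using h1, by simp [h2]⟩
        simp only [csLoopA, heq, if_pos, List.zip_cons_cons, List.filter_cons,
          bne_self_eq_false, Bool.false_eq_true, if_false]
        exact ih r2 hpre'
      · have hne : c1 ≠ c2 := fun h => heq (h ▸ beq_self_eq_true c1)
        simp only [csLoopA, heq, Bool.false_eq_true, if_false, List.zip_cons_cons,
          List.filter_cons, bne, Bool.not_false, if_true]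
        exact csStep_eq c1 c2 hne

-- ===== VERDICT (by name: the statement is the Claim_ definition above) =====
theorem card_sorting_spec : Claim_equal_card_sorting := by
  intro card1 card2 _ hpre
  unfold Spec_card_sorting card_sorting card_sorting_alt
  exact csLoop_eq _ _ hpre
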